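-- pv_equiv track=rewrite | github.com/BalancedBaseball/RunExpectancyApp | runexpectancyfunctions.py | runner_destinations_to_bases_occupied
-- ===== SOURCE A (Python) =====
-- def runner_destinations_to_bases_occupied(runner_destinations: str):
--     new_runner_destinations_lst = ['0', '0', '0', '0']
--     score = 0
--     runner_destinations_lst = list(runner_destinations)
--     for runner in runner_destinations_lst:
--         if runner != '0' and int(runner) < 4:
--             new_runner_destinations_lst[int(runner)] = '1'
--         if int(runner) >= 4:
--             score += 1
--     new_bases_occupied = ''.join(new_runner_destinations_lst)
--     return (new_bases_occupied, score)
-- ===== SOURCE B (Python) =====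
-- def runner_destinations_to_bases_occupied(runner_destinations: str):
--     score = sum(1 for c in runner_destinations if int(c) >= 4)
--     dests = set(runner_destinations)
--     occupancy = '0' + ''.join('1' if str(b) in dests else '0' for b in (1, 2, 3))
--     return (occupancy, score)
-- ===== Notes on version B (the rewrite author's own statement) =====
-- stated objective: idiomatic
-- what changed: Instead of one stateful loop over the input that mutates a 4-slot char list and a score, B counts the score in one comprehension pass and builds the occupancy string by iterating over the three real bases and testing membership in a set of the input's characters.
import Mathlib
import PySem

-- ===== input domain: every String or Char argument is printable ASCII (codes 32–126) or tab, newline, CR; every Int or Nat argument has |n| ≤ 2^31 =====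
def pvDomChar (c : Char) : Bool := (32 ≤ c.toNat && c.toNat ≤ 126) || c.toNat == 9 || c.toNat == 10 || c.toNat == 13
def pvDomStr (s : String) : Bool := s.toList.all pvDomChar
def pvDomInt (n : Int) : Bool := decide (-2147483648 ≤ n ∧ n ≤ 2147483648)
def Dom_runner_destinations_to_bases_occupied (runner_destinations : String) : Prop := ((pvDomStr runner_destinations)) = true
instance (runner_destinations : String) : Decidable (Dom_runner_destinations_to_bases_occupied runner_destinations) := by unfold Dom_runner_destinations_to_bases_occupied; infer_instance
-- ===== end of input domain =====

-- B builds the occupancy string by membership of each real base's digit in the set of input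
-- characters, and counts the score in a separate pass (idiomatic restructuring; same cost).

-- ===== PORT A =====
-- int(c) for a single digit char (exact on Pre_, where every char is '0'..'9')
def pvDigitInt (c : Char) : Int := (c.toNat : Int) - 48

def runner_destinations_to_bases_occupied (runner_destinations : String) : String × Int :=
  let st := runner_destinations.toList.foldl
    (fun (st : List Char × Int) (runner : Char) =>
      let lst := if runner ≠ '0' ∧ pvDigitInt runner < 4
                 then st.1.set (pvDigitInt runner).toNat '1' else st.1
      let score := if pvDigitInt runner ≥ 4 then st.2 + 1 else st.2
      (lst, score))
    (['0', '0', '0', '0'], (0 : Int))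
  (String.ofList st.1, st.2)

-- ===== PORT B =====
def runner_destinations_to_bases_occupied_alt (runner_destinations : String) : String × Int :=
  let score : Int := (runner_destinations.toList.filter
      (fun c => pvDigitInt c ≥ 4)).length
  let dests : PySem.Set Char := PySem.Set.ofList runner_destinations.toList
  let occ := String.ofList ('0' :: (['1', '2', '3'].map
      (fun b => if PySem.Set.contains dests b then '1' else '0')))
  (occ, score)

-- ===== PRECONDITION & SPEC =====
-- Pre_ excludes exactly the inputs containing a non-digit character, on which Python A
-- raises ValueError from int(runner).
def Pre_runner_destinations_to_bases_occupied (runner_destinations : String) : Prop :=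
  runner_destinations.toList.all (fun c => '0' ≤ c && c ≤ '9') = true
instance (runner_destinations : String) : Decidable (Pre_runner_destinations_to_bases_occupied runner_destinations) := by unfold Pre_runner_destinations_to_bases_occupied; infer_instance

def pvWitness_runner_destinations_to_bases_occupied : String := "14"

def Spec_runner_destinations_to_bases_occupied (runner_destinations : String) (out : String × Int) : Prop := out = runner_destinations_to_bases_occupied_alt runner_destinations
instance (runner_destinations : String) (out : String × Int) : Decidable (Spec_runner_destinations_to_bases_occupied runner_destinations out) := by unfold Spec_runner_destinations_to_bases_occupied; infer_instance

-- ===== CLAIM (what is proved, stated in full; the proofs are below) =====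
def Claim_equal_runner_destinations_to_bases_occupied : Prop := ∀ (runner_destinations : String), Dom_runner_destinations_to_bases_occupied runner_destinations → Pre_runner_destinations_to_bases_occupied runner_destinations → Spec_runner_destinations_to_bases_occupied runner_destinations (runner_destinations_to_bases_occupied runner_destinations)

-- ===== LEMMAS AND PROOFS =====

-- a digit char is one of the ten digit literals
theorem pvDigit_cases (c : Char) (h : '0' ≤ c ∧ c ≤ '9') :
    c ∈ ['0','1','2','3','4','5','6','7','8','9'] := by
  obtain ⟨h1, h2⟩ := h
  have e : Char.ofNat c.toNat = c := Char.ofNat_toNat c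
  have lb : 48 ≤ c.toNat := h1
  have ub : c.toNat ≤ 57 := h2
  interval_cases h : c.toNat <;> (rw [← e]; decide)

def pvOcc (l : List Char) (b x : Char) : Char := if b ∈ l then '1' else x

-- loop invariant for A's fold over a digit string
theorem pvA_fold (l : List Char) (hd : ∀ c ∈ l, '0' ≤ c ∧ c ≤ '9') :
    ∀ (x1 x2 x3 : Char) (sc : Int),
    l.foldl
      (fun (st : List Char × Int) (runner : Char) =>
        let lst := if runner ≠ '0' ∧ pvDigitInt runner < 4
                   then st.1.set (pvDigitInt runner).toNat '1' else st.1
        let score := if pvDigitInt runner ≥ 4 then st.2 + 1 else st.2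
        (lst, score))
      (['0', x1, x2, x3], sc)
    = (['0', pvOcc l '1' x1, pvOcc l '2' x2, pvOcc l '3' x3],
       sc + ((l.filter (fun c => pvDigitInt c ≥ 4)).length : Int)) := by
  induction l with
  | nil => intro x1 x2 x3 sc; simp [pvOcc]
  | cons c rest ih =>
    intro x1 x2 x3 sc
    have hc := pvDigit_cases c (hd c (List.mem_cons_self))
    have hrest : ∀ c ∈ rest, '0' ≤ c ∧ c ≤ '9' := fun c hm => hd c (List.mem_cons_of_mem _ hm)
    have ih' := ih hrest
    fin_cases hc <;>
      (simp [List.foldl_cons, pvDigitInt, List.set, pvOcc, List.filter] at ih' ⊢;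
       simp [ih', Prod.ext_iff] <;> ring)

theorem pvOcc_eq (l : List Char) (b : Char) :
    pvOcc l b '0' = if PySem.Set.contains (PySem.Set.ofList l) b then '1' else '0' := by
  simp [pvOcc, PySem.Set.mem_ofList]

-- ===== VERDICT (by name: the statement is the Claim_ definition above) =====
theorem runner_destinations_to_bases_occupied_spec : Claim_equal_runner_destinations_to_bases_occupied := by
  intro s _ hpre
  have hd : ∀ c ∈ s.toList, '0' ≤ c ∧ c ≤ '9' := by
    simpa [Pre_runner_destinations_to_bases_occupied, List.all_eq_true] using hpre
  unfold Spec_runner_destinations_to_bases_occupied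
  unfold runner_destinations_to_bases_occupied runner_destinations_to_bases_occupied_alt
  rw [pvA_fold s.toList hd]
  simp [pvOcc_eq]
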